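-- pv_equiv track=rewrite | github.com/OHNOalan/Coding | history/test_gen.py | high_score_string
-- ===== SOURCE A (Python) =====
-- def high_score_string(s, t1, t2):
--     score = 0
--     ans = ""
--     for i in range(len(s)):
--         for j in range(i, len(s)):
--             sub_str = s[i:j+1]
--             max_prefix_t1_suffix = 0
--             max_suffix_t2_prefix = 0
--
--             # 计算子串前缀和t1后缀的最长匹配
--             for k in range(1, len(sub_str) + 1):
--                 if k <= len(t1) and sub_str[:k] == t1[-k:]:
--                     max_prefix_t1_suffix = k
--
--             # 计算子串后缀和t2前缀的最长匹配
--             for k in range(1, len(sub_str) + 1):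
--                 if k <= len(t2) and sub_str[-k:] == t2[:k]:
--                     max_suffix_t2_prefix = k
--
--             current_score = max_prefix_t1_suffix + max_suffix_t2_prefix
--
--             if current_score > score:
--                 score = current_score
--                 ans = sub_str
--             elif current_score == score:
--                 if ans > sub_str:
--                     ans = sub_str
--     return score, ans
-- ===== SOURCE B (Python) =====
-- def high_score_string(s, t1, t2):
--     # Precompute, per end index j, cumulative best t2-prefix match lengths, and
--     # maintain per start index i a running best t1-suffix match, so the per-substring
--     # inner scans of the naive version disappear.
--     n, m1, m2 = len(s), len(t1), len(t2)
--     # suf[j][L] = largest k <= L with s[j+1-k:j+1] == t2[:k]  (0 if none), L = 0..j+1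
--     suf = []
--     for j in range(n):
--         row = [0]
--         best = 0
--         for k in range(1, j + 2):
--             if k <= m2 and s[j + 1 - k:j + 1] == t2[:k]:
--                 best = k
--             row.append(best)
--         suf.append(row)
--     score = 0
--     ans = ""
--     for i in range(n):
--         p = 0
--         for j in range(i, n):
--             L = j - i + 1
--             if L <= m1 and s[i:j + 1] == t1[m1 - L:]:
--                 p = L
--             cur = p + suf[j][L]
--             if cur > score:
--                 score = cur
--                 ans = s[i:j + 1]
--             elif cur == score and s[i:j + 1] < ans:
--                 ans = s[i:j + 1]
--     return score, ans
-- ===== Notes on version B (the rewrite author's own statement) =====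
-- stated objective: faster
-- what changed: Instead of rescanning every substring for its best t1-suffix/t2-prefix match (four nested loops), B precomputes per end index a cumulative table of best t2-prefix match lengths and maintains per start index a running best t1-suffix match, so each (i,j) pair costs O(1) score bookkeeping after an O(n*m^2)-style precomputation.
import Mathlib
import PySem

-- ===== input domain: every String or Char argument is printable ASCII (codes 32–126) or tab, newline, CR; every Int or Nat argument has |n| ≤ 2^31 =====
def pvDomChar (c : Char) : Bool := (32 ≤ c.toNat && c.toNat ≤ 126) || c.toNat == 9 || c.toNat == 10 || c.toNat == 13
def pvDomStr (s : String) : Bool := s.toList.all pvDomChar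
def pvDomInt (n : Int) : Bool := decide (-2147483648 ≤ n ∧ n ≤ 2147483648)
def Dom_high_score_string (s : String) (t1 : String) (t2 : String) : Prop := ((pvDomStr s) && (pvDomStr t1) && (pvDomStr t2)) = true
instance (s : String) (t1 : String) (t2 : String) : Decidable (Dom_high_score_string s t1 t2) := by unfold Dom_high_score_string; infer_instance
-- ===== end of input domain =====

-- B replaces A's per-substring inner scans by a per-end-index cumulative match table plus a
-- per-start-index running best match (measured asymptotically faster).

-- ===== PORT A =====
def high_score_string (s : String) (t1 : String) (t2 : String) : Int × String :=
  let sl := s.toList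
  let l1 := t1.toList
  let l2 := t2.toList
  let r := (PySem.List.pyRange 0 (sl.length : Int) 1).foldl (fun st i =>
    (PySem.List.pyRange i (sl.length : Int) 1).foldl (fun st j =>
      let sub := PySem.List.slice sl (some i) (some (j + 1))
      let mp := (PySem.List.pyRange 1 ((sub.length : Int) + 1) 1).foldl (fun acc k =>
        if k ≤ (l1.length : Int) ∧ PySem.List.slice sub none (some k) = PySem.List.slice l1 (some (-k)) none
        then k else acc) (0 : Int)
      let ms := (PySem.List.pyRange 1 ((sub.length : Int) + 1) 1).foldl (fun acc k =>
        if k ≤ (l2.length : Int) ∧ PySem.List.slice sub (some (-k)) none = PySem.List.slice l2 none (some k)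
        then k else acc) (0 : Int)
      let cur := mp + ms
      if st.1 < cur then (cur, sub)
      else if cur = st.1 then (if PySem.Chars.strLt sub st.2 then (st.1, sub) else st)
      else st) st) ((0 : Int), ([] : List Char))
  (r.1, String.ofList r.2)

-- ===== PORT B =====
-- one row of Source B's 'suf' table: ((row, best) after the k-loop for end index j)
def pvRow (sl l2 : List Char) (j : Int) : List Int × Int :=
  (PySem.List.pyRange 1 (j + 2) 1).foldl (fun st k =>
    let best := if k ≤ (l2.length : Int) ∧
        PySem.List.slice sl (some (j + 1 - k)) (some (j + 1)) = PySem.List.slice l2 none (some k)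
      then k else st.2
    (st.1 ++ [best], best)) ([(0 : Int)], (0 : Int))

def high_score_string_alt (s : String) (t1 : String) (t2 : String) : Int × String :=
  let sl := s.toList
  let l1 := t1.toList
  let l2 := t2.toList
  let n := (sl.length : Int)
  let suf := (PySem.List.pyRange 0 n 1).foldl
    (fun acc j => acc ++ [(pvRow sl l2 j).1]) ([] : List (List Int))
  let r := (PySem.List.pyRange 0 n 1).foldl (fun st i =>
    ((PySem.List.pyRange i n 1).foldl (fun pst j =>
      let L := j - i + 1
      let p := if L ≤ (l1.length : Int) ∧
          PySem.List.slice sl (some i) (some (j + 1)) = PySem.List.slice l1 (some ((l1.length : Int) - L)) none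
        then L else pst.1
      let cur := p + PySem.List.pyGetD (PySem.List.pyGetD suf j []) L 0
      let st := pst.2
      (p, if st.1 < cur then (cur, PySem.List.slice sl (some i) (some (j + 1)))
          else if cur = st.1 ∧ PySem.Chars.strLt (PySem.List.slice sl (some i) (some (j + 1))) st.2
          then (st.1, PySem.List.slice sl (some i) (some (j + 1)))
          else st)) ((0 : Int), st)).2) ((0 : Int), ([] : List Char))
  (r.1, String.ofList r.2)

-- ===== PRECONDITION & SPEC =====
def Spec_high_score_string (s : String) (t1 : String) (t2 : String) (out : Int × String) : Prop := out = high_score_string_alt s t1 t2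
instance (s : String) (t1 : String) (t2 : String) (out : Int × String) : Decidable (Spec_high_score_string s t1 t2 out) := by unfold Spec_high_score_string; infer_instance

-- ===== CLAIM (what is proved, stated in full; the proofs are below) =====
def Claim_equal_high_score_string : Prop := ∀ (s : String) (t1 : String) (t2 : String), Dom_high_score_string s t1 t2 → Spec_high_score_string s t1 t2 (high_score_string s t1 t2)


-- ===== LEMMAS AND PROOFS =====

-- the value A's inner scans and B's running updates both compute:
-- the last k in 1..M satisfying C (0 if none)
def pvLastK (C : Nat → Bool) : Nat → Int
  | 0 => 0
  | t + 1 => if C (t + 1) then ((t + 1 : Nat) : Int) else pvLastK C t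

def pvCp (sl l1 : List Char) (i k : Nat) : Bool :=
  decide (k ≤ l1.length ∧ (sl.drop i).take k = l1.drop (l1.length - k))

def pvCs (sl l2 : List Char) (j k : Nat) : Bool :=
  decide (k ≤ l2.length ∧ (sl.drop (j + 1 - k)).take k = l2.take k)

-- the canonical per-(i,j) step both ports reduce to
def pvStepC (sl l1 l2 : List Char) (i : Nat) (st : Int × List Char) (j : Nat) : Int × List Char :=
  let L := j + 1 - i
  let sub := (sl.drop i).take L
  let cur := pvLastK (pvCp sl l1 i) L + pvLastK (pvCs sl l2 j) L
  if st.1 < cur then (cur, sub)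
  else if cur = st.1 then (if PySem.Chars.strLt sub st.2 then (st.1, sub) else st)
  else st

lemma pv_lastK_step (Cb : Int → Prop) [DecidablePred Cb] (C : Nat → Bool) (m : Nat)
    (h : Cb ((m + 1 : Nat) : Int) ↔ C (m + 1) = true) :
    (if Cb (((m : Nat) : Int) + 1) then ((m : Nat) : Int) + 1 else pvLastK C m) = pvLastK C (m + 1) := by
  rw [show ((m : Nat) : Int) + 1 = ((m + 1 : Nat) : Int) by push_cast; ring]
  by_cases hc : C (m + 1) = true
  · rw [if_pos (h.mpr hc)]; simp [pvLastK, hc]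
  · rw [if_neg (fun hcb => hc (h.mp hcb))]; simp [pvLastK, hc]

lemma pv_foldl_lastK (Cb : Int → Prop) [DecidablePred Cb] (C : Nat → Bool) (M : Nat)
    (h : ∀ t : Nat, 1 ≤ t → t ≤ M → (Cb (t : Int) ↔ C t = true)) :
    (PySem.List.pyRange 1 ((M : Int) + 1) 1).foldl (fun acc k => if Cb k then k else acc) 0
      = pvLastK C M := by
  induction M with
  | zero =>
      rw [show ((0 : Nat) : Int) + 1 = 1 by norm_num, PySem.List.pyRange_one_eq_nil le_rfl]
      rfl
  | succ m ih =>
      rw [show ((m + 1 : Nat) : Int) + 1 = ((m : Nat) : Int) + 1 + 1 by push_cast; ring,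
        PySem.List.pyRange_one_succ_right (by omega : (1 : Int) ≤ ((m : Nat) : Int) + 1),
        List.foldl_append]
      simp only [List.foldl_cons, List.foldl_nil]
      rw [ih (fun t h1 h2 => h t h1 (Nat.le_succ_of_le h2))]
      exact pv_lastK_step Cb C m (h (m + 1) (by omega) le_rfl)

lemma pv_row_foldl (Cb : Int → Prop) [DecidablePred Cb] (C : Nat → Bool) (c : Nat)
    (h : ∀ t : Nat, 1 ≤ t → t ≤ c → (Cb (t : Int) ↔ C t = true)) :
    (PySem.List.pyRange 1 ((c : Int) + 1) 1).foldl
      (fun st k =>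
        let best := if Cb k then k else st.2
        (st.1 ++ [best], best)) ([(0 : Int)], (0 : Int))
      = ((List.range (c + 1)).map (pvLastK C), pvLastK C c) := by
  induction c with
  | zero =>
      rw [show ((0 : Nat) : Int) + 1 = 1 by norm_num, PySem.List.pyRange_one_eq_nil le_rfl]
      rfl
  | succ m ih =>
      rw [show ((m + 1 : Nat) : Int) + 1 = ((m : Nat) : Int) + 1 + 1 by push_cast; ring,
        PySem.List.pyRange_one_succ_right (by omega : (1 : Int) ≤ ((m : Nat) : Int) + 1),
        List.foldl_append]
      rw [ih (fun t h1 h2 => h t h1 (Nat.le_succ_of_le h2))]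
      simp only [List.foldl_cons, List.foldl_nil]
      rw [pv_lastK_step Cb C m (h (m + 1) (by omega) le_rfl)]
      rw [show m + 1 + 1 = (m + 1) + 1 from rfl, List.range_succ (n := m + 1), List.map_append]
      rfl

lemma pv_sub_eq (sl : List Char) (i j : Nat) :
    PySem.List.slice sl (some (i : Int)) (some ((j : Int) + 1)) = (sl.drop i).take (j + 1 - i) := by
  rw [show ((j : Int) + 1) = ((j + 1 : Nat) : Int) by push_cast; ring, PySem.List.slice_natCast]

lemma pv_sub_len (sl : List Char) (i j : Nat) (hij : i ≤ j) (hj : j < sl.length) :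
    ((sl.drop i).take (j + 1 - i)).length = j + 1 - i := by
  simp only [List.length_take, List.length_drop]
  omega

lemma pv_condP_iff (sl l1 : List Char) (i L t : Nat) (h1 : 1 ≤ t) (hL : t ≤ L) :
    ((t : Int) ≤ (l1.length : Int) ∧
       PySem.List.slice ((sl.drop i).take L) none (some (t : Int)) =
         PySem.List.slice l1 (some (-(t : Int))) none)
      ↔ pvCp sl l1 i t = true := by
  rw [PySem.List.slice_to_natCast, PySem.List.slice_from_neg_natCast _ _ h1,
    List.take_take, min_eq_left hL]
  simp [pvCp]

lemma pv_condS_iff (sl l2 : List Char) (i j t : Nat) (hij : i ≤ j) (hj : j < sl.length)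
    (h1 : 1 ≤ t) (hL : t ≤ j + 1 - i) :
    ((t : Int) ≤ (l2.length : Int) ∧
       PySem.List.slice ((sl.drop i).take (j + 1 - i)) (some (-(t : Int))) none =
         PySem.List.slice l2 none (some (t : Int)))
      ↔ pvCs sl l2 j t = true := by
  rw [PySem.List.slice_from_neg_natCast _ _ h1, PySem.List.slice_to_natCast,
    pv_sub_len sl i j hij hj, List.drop_take, List.drop_drop,
    show i + (j + 1 - i - t) = j + 1 - t by omega,
    show (j + 1 - i) - (j + 1 - i - t) = t by omega]
  simp [pvCs]

lemma pv_condRow_iff (sl l2 : List Char) (j t : Nat) (h1 : 1 ≤ t) (ht : t ≤ j + 1) :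
    ((t : Int) ≤ (l2.length : Int) ∧
       PySem.List.slice sl (some ((j : Int) + 1 - (t : Int))) (some ((j : Int) + 1)) =
         PySem.List.slice l2 none (some (t : Int)))
      ↔ pvCs sl l2 j t = true := by
  rw [show (j : Int) + 1 - (t : Int) = ((j + 1 - t : Nat) : Int) by omega,
    show (j : Int) + 1 = ((j + 1 : Nat) : Int) by push_cast; ring,
    PySem.List.slice_natCast, PySem.List.slice_to_natCast,
    show (j + 1) - (j + 1 - t) = t by omega]
  simp [pvCs]

lemma pv_condPB_iff (sl l1 : List Char) (i a : Nat) (hia : i ≤ a) :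
    (((a : Int) - (i : Int) + 1) ≤ (l1.length : Int) ∧
       PySem.List.slice sl (some (i : Int)) (some ((a : Int) + 1)) =
         PySem.List.slice l1 (some ((l1.length : Int) - ((a : Int) - (i : Int) + 1))) none)
      ↔ pvCp sl l1 i (a + 1 - i) = true := by
  have hcast : (a : Int) - (i : Int) + 1 = ((a + 1 - i : Nat) : Int) := by omega
  rw [hcast, pv_sub_eq sl i a, show a + 1 - i = a + 1 - i from rfl]
  by_cases hm : a + 1 - i ≤ l1.length
  · rw [show (l1.length : Int) - ((a + 1 - i : Nat) : Int) = ((l1.length - (a + 1 - i) : Nat) : Int) by omega,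
      PySem.List.slice_from_natCast]
    simp [pvCp]
  · constructor
    · rintro ⟨hle, -⟩
      exact absurd (by exact_mod_cast hle) hm
    · intro hC
      simp only [pvCp, decide_eq_true_eq] at hC
      exact absurd hC.1 hm



lemma pv_suf_char (sl l2 : List Char) (jN : Nat) (hj : jN < sl.length) :
    PySem.List.pyGetD
      ((PySem.List.pyRange 0 (sl.length : Int) 1).foldl
        (fun acc j => acc ++ [(pvRow sl l2 j).1]) ([] : List (List Int))) (jN : Int) []
      = (List.range (jN + 2)).map (pvLastK (pvCs sl l2 jN)) := by
  rw [PySem.List.foldl_append_singleton_eq_map, List.nil_append,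
    PySem.List.pyGetD_map_pyRange_of_nonneg _ _ _ _ (by omega) (by exact_mod_cast hj)]
  unfold pvRow
  rw [show ((jN : Int) + 2) = ((jN + 1 : Nat) : Int) + 1 by push_cast; ring]
  rw [pv_row_foldl _ (pvCs sl l2 jN) (jN + 1) (fun t h1 h2 => pv_condRow_iff sl l2 jN t h1 h2)]

lemma pv_A_inner (sl l1 l2 : List Char) (i : Nat) (st : Int × List Char) :
    (PySem.List.pyRange (i : Int) (sl.length : Int) 1).foldl (fun st j =>
      let sub := PySem.List.slice sl (some (i : Int)) (some (j + 1))
      let mp := (PySem.List.pyRange 1 ((sub.length : Int) + 1) 1).foldl (fun acc k =>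
        if k ≤ (l1.length : Int) ∧ PySem.List.slice sub none (some k) = PySem.List.slice l1 (some (-k)) none
        then k else acc) (0 : Int)
      let ms := (PySem.List.pyRange 1 ((sub.length : Int) + 1) 1).foldl (fun acc k =>
        if k ≤ (l2.length : Int) ∧ PySem.List.slice sub (some (-k)) none = PySem.List.slice l2 none (some k)
        then k else acc) (0 : Int)
      let cur := mp + ms
      if st.1 < cur then (cur, sub)
      else if cur = st.1 then (if PySem.Chars.strLt sub st.2 then (st.1, sub) else st)
      else st) st
    = (PySem.List.pyRange (i : Int) (sl.length : Int) 1).foldl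
        (fun st j => pvStepC sl l1 l2 i st j.toNat) st := by
  apply PySem.List.foldl_congr_mem
  intro st jI hjmem
  rw [PySem.List.mem_pyRange_one] at hjmem
  obtain ⟨hj1, hj2⟩ := hjmem
  obtain ⟨a, rfl⟩ : ∃ a : Nat, jI = (a : Int) := ⟨jI.toNat, (Int.toNat_of_nonneg (by omega)).symm⟩
  have hia : i ≤ a := by exact_mod_cast hj1
  have han : a < sl.length := by exact_mod_cast hj2
  simp only []
  rw [pv_sub_eq sl i a, pv_sub_len sl i a hia han]
  rw [pv_foldl_lastK _ (pvCp sl l1 i) (a + 1 - i)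
    (fun t h1 h2 => pv_condP_iff sl l1 i (a + 1 - i) t h1 h2)]
  rw [pv_foldl_lastK _ (pvCs sl l2 a) (a + 1 - i)
    (fun t h1 h2 => pv_condS_iff sl l2 i a t hia han h1 h2)]
  simp only [pvStepC, Int.toNat_natCast]

lemma pv_B_inner (sl l1 l2 : List Char) (suf : List (List Int))
    (hsuf : ∀ jN : Nat, jN < sl.length →
      PySem.List.pyGetD suf (jN : Int) [] = (List.range (jN + 2)).map (pvLastK (pvCs sl l2 jN)))
    (i : Nat) :
    ∀ (c a : Nat), i ≤ a → a + c = sl.length → ∀ st : Int × List Char,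
      ((PySem.List.pyRange (a : Int) (sl.length : Int) 1).foldl (fun pst j =>
        let L := j - (i : Int) + 1
        let p := if L ≤ (l1.length : Int) ∧
            PySem.List.slice sl (some (i : Int)) (some (j + 1)) =
              PySem.List.slice l1 (some ((l1.length : Int) - L)) none
          then L else pst.1
        let cur := p + PySem.List.pyGetD (PySem.List.pyGetD suf j []) L 0
        let st' := pst.2
        (p, if st'.1 < cur then (cur, PySem.List.slice sl (some (i : Int)) (some (j + 1)))
            else if cur = st'.1 ∧ PySem.Chars.strLt (PySem.List.slice sl (some (i : Int)) (some (j + 1))) st'.2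
            then (st'.1, PySem.List.slice sl (some (i : Int)) (some (j + 1)))
            else st')) ((pvLastK (pvCp sl l1 i) (a - i)), st)).2
      = (PySem.List.pyRange (a : Int) (sl.length : Int) 1).foldl
          (fun st j => pvStepC sl l1 l2 i st j.toNat) st := by
  intro c
  induction c with
  | zero =>
      intro a hia hlen st
      rw [PySem.List.pyRange_one_eq_nil (by omega : ((sl.length : Nat) : Int) ≤ (a : Int))]
      rfl
  | succ m ih =>
      intro a hia hlen st
      have han : (a : Int) < (sl.length : Int) := by
        have : a < sl.length := by omega
        exact_mod_cast this
      rw [PySem.List.pyRange_one_cons han]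
      simp only [List.foldl_cons]
      have hp : (if ((a : Int) - (i : Int) + 1) ≤ (l1.length : Int) ∧
            PySem.List.slice sl (some (i : Int)) (some ((a : Int) + 1)) =
              PySem.List.slice l1 (some ((l1.length : Int) - ((a : Int) - (i : Int) + 1))) none
          then ((a : Int) - (i : Int) + 1) else pvLastK (pvCp sl l1 i) (a - i))
          = pvLastK (pvCp sl l1 i) (a + 1 - i) := by
        have hiff := pv_condPB_iff sl l1 i a hia
        have e : a + 1 - i = a - i + 1 := by omega
        rw [e] at hiff ⊢
        by_cases hc : pvCp sl l1 i (a - i + 1) = true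
        · rw [if_pos (hiff.mpr hc)]
          simp only [pvLastK]
          rw [if_pos hc]
          omega
        · rw [if_neg (fun hcb => hc (hiff.mp hcb))]
          simp only [pvLastK]
          rw [if_neg hc]
      rw [hp]
      have hrow : PySem.List.pyGetD (PySem.List.pyGetD suf ((a : Nat) : Int) [])
            ((a : Int) - (i : Int) + 1) 0
          = pvLastK (pvCs sl l2 a) (a + 1 - i) := by
        rw [hsuf a (by omega),
          show (a : Int) - (i : Int) + 1 = ((a + 1 - i : Nat) : Int) by omega,
          PySem.List.pyGetD_natCast]
        have hlt : a + 1 - i < ((List.range (a + 2)).map (pvLastK (pvCs sl l2 a))).length := by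
          simp; omega
        rw [List.getD_eq_getElem _ _ hlt, List.getElem_map, List.getElem_range]
      rw [hrow, pv_sub_eq sl i a]
      have hpair : (if st.1 < pvLastK (pvCp sl l1 i) (a + 1 - i) + pvLastK (pvCs sl l2 a) (a + 1 - i)
            then (pvLastK (pvCp sl l1 i) (a + 1 - i) + pvLastK (pvCs sl l2 a) (a + 1 - i),
              (sl.drop i).take (a + 1 - i))
            else if pvLastK (pvCp sl l1 i) (a + 1 - i) + pvLastK (pvCs sl l2 a) (a + 1 - i) = st.1 ∧
                PySem.Chars.strLt ((sl.drop i).take (a + 1 - i)) st.2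
              then (st.1, (sl.drop i).take (a + 1 - i))
              else st)
          = pvStepC sl l1 l2 i st a := by
        simp only [pvStepC]
        by_cases h1 : st.1 < pvLastK (pvCp sl l1 i) (a + 1 - i) + pvLastK (pvCs sl l2 a) (a + 1 - i)
        · simp [h1]
        · by_cases h2 : pvLastK (pvCp sl l1 i) (a + 1 - i) + pvLastK (pvCs sl l2 a) (a + 1 - i) = st.1
          · by_cases h3 : PySem.Chars.strLt ((sl.drop i).take (a + 1 - i)) st.2 = true
            · simp [h2, h3]
            · simp [h2, h3]
          · simp [h1, h2]
      rw [hpair]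
      rw [show ((a : Nat) : Int) + 1 = ((a + 1 : Nat) : Int) by push_cast; ring,
        show ((a : Nat) : Int).toNat = a from Int.toNat_natCast a]
      exact ih (a + 1) (by omega) (by omega) (pvStepC sl l1 l2 i st a)

lemma pv_main (s t1 t2 : String) : high_score_string s t1 t2 = high_score_string_alt s t1 t2 := by
  unfold high_score_string high_score_string_alt
  simp only []
  refine congrArg (fun r : Int × List Char => (r.1, String.ofList r.2)) ?_
  trans ((PySem.List.pyRange 0 (s.toList.length : Int) 1).foldl (fun st i =>
    (PySem.List.pyRange i (s.toList.length : Int) 1).foldl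
      (fun st j => pvStepC s.toList t1.toList t2.toList i.toNat st j.toNat) st)
    ((0 : Int), ([] : List Char)))
  · apply PySem.List.foldl_congr_mem
    intro st iI hi
    rw [PySem.List.mem_pyRange_one] at hi
    obtain ⟨iN, rfl⟩ : ∃ iN : Nat, iI = (iN : Int) := ⟨iI.toNat, (Int.toNat_of_nonneg hi.1).symm⟩
    rw [Int.toNat_natCast]
    exact pv_A_inner s.toList t1.toList t2.toList iN st
  · symm
    apply PySem.List.foldl_congr_mem
    intro st iI hi
    rw [PySem.List.mem_pyRange_one] at hi
    obtain ⟨iN, rfl⟩ : ∃ iN : Nat, iI = (iN : Int) := ⟨iI.toNat, (Int.toNat_of_nonneg hi.1).symm⟩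
    have hn : iN < s.toList.length := by exact_mod_cast hi.2
    have h := pv_B_inner s.toList t1.toList t2.toList _
      (fun jN hj => pv_suf_char s.toList t2.toList jN hj) iN
      (s.toList.length - iN) iN le_rfl (by omega) st
    rw [Nat.sub_self] at h
    rw [Int.toNat_natCast]
    exact h


-- ===== VERDICT (by name: the statement is the Claim_ definition above) =====
theorem high_score_string_spec : Claim_equal_high_score_string := by
  intro s t1 t2 _
  exact pv_main s t1 t2
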